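-- pv_equiv track=rewrite | github.com/jt291/algorithmique | tex/td/corriges/td3/td3.22.py | decodage
-- ===== SOURCE A (Python) =====
-- def decodage(code,b=2) :
--     """
--     n = decodage(code,b)
--     valeur décimale de l'entier correspondant au code en base b
--
--     >>> decodage(codage(0,2,8,False)[1],2)
--     0
--     >>> decodage(codage(65,2,8,True)[1],2)
--     65
--     >>> decodage(codage(79,16,4,True)[1],16)
--     79
--     """
--     assert type(code) is list
--     assert type(b) is int and b > 1
--
--     x = 0
--     for i in range(len(code)) :
--         c = code[len(code)-1-i]
--         x = x + c*b**i
--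
--     return x
-- ===== SOURCE B (Python) =====
-- def decodage(code, b=2):
--     """Horner's method: one pass, O(n) bigint multiplies instead of recomputing b**i."""
--     assert type(code) is list
--     assert type(b) is int and b > 1
--     x = 0
--     for c in code:
--         x = x * b + c
--     return x
-- ===== Notes on version B (the rewrite author's own statement) =====
-- stated objective: faster
-- what changed: Replaces the reversed-index loop computing sum(code[n-1-i]*b**i) with a single left-to-right Horner pass x = x*b + c, removing the per-step exponentiation b**i.
import Mathlib
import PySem

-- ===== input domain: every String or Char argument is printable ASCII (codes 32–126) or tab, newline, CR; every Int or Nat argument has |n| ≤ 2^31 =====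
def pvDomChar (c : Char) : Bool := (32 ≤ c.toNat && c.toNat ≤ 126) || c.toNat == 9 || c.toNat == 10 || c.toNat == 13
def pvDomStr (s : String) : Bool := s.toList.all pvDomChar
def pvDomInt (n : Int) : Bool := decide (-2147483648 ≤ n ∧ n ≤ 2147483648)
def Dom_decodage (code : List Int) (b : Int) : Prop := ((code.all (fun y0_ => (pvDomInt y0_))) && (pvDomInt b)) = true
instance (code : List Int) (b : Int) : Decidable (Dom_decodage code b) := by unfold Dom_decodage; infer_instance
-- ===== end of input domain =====

-- B replaces A's reversed-index sum of code[n-1-i]*b**i by a single Horner pass x = x*b + c (faster: O(n) vs O(n^2) bigint ops).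


-- ===== PORT A =====
-- for i in range(len(code)): c = code[len(code)-1-i]; x = x + c*b**i
-- the index len(code)-1-i is always in range, so pyGetD with default 0 is exact here
def decodage (code : List Int) (b : Int) : Int :=
  (PySem.List.pyRange 0 (code.length : Int) 1).foldl
    (fun x i => x + (PySem.List.pyGetD code ((code.length : Int) - 1 - i) 0) * b ^ i.toNat) 0

-- ===== PORT B =====
-- Horner: x = x*b + c over the list, left to right
def decodage_alt (code : List Int) (b : Int) : Int :=
  code.foldl (fun x c => x * b + c) 0

-- ===== PRECONDITION & SPEC =====
-- A's 'assert b > 1' raises AssertionError for b ≤ 1; exactly those inputs are excluded.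
def Pre_decodage (code : List Int) (b : Int) : Prop := 1 < b
instance (code : List Int) (b : Int) : Decidable (Pre_decodage code b) := by unfold Pre_decodage; infer_instance
def pvWitness_decodage : List Int × Int := ([1, 0, 1], 2)

def Spec_decodage (code : List Int) (b : Int) (out : Int) : Prop := out = decodage_alt code b
instance (code : List Int) (b : Int) (out : Int) : Decidable (Spec_decodage code b out) := by unfold Spec_decodage; infer_instance

-- ===== CLAIM (what is proved, stated in full; the proofs are below) =====
def Claim_equal_decodage : Prop := ∀ (code : List Int) (b : Int), Dom_decodage code b → Pre_decodage code b → Spec_decodage code b (decodage code b)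

-- ===== LEMMAS AND PROOFS =====

-- shifting Horner's accumulator
theorem horner_shift (b : Int) (cs : List Int) (x : Int) :
    cs.foldl (fun x c => x * b + c) x = x * b ^ cs.length + cs.foldl (fun x c => x * b + c) 0 := by
  induction cs generalizing x with
  | nil => simp
  | cons c cs ih =>
    simp only [List.foldl_cons, List.length_cons]
    rw [ih (x * b + c), ih (0 * b + c)]
    ring

-- A's indexed sum equals B's Horner fold (for every b)
theorem key (b : Int) (cs : List Int) : decodage cs b = decodage_alt cs b := by
  induction cs with
  | nil => simp [decodage, decodage_alt]
  | cons c cs ih =>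
    unfold decodage decodage_alt
    have hn : ((cs.length : Int)) ≤ (cs.length : Int) + 1 := by omega
    rw [show ((c :: cs).length : Int) = (cs.length : Int) + 1 by simp,
        PySem.List.pyRange_one_succ_right (by positivity)]
    rw [List.foldl_append]
    have hcong :
        (PySem.List.pyRange 0 (cs.length : Int) 1).foldl
          (fun x i => x + PySem.List.pyGetD (c :: cs) ((cs.length : Int) + 1 - 1 - i) 0 * b ^ i.toNat) 0
        = (PySem.List.pyRange 0 (cs.length : Int) 1).foldl
          (fun x i => x + PySem.List.pyGetD cs ((cs.length : Int) - 1 - i) 0 * b ^ i.toNat) 0 := by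
      apply PySem.List.foldl_congr_mem
      intro x i hi
      have hmem := (PySem.List.mem_pyRange_one).1 hi
      have h1 : 0 ≤ (cs.length : Int) + 1 - 1 - i := by omega
      have h2 : (cs.length : Int) + 1 - 1 - i < ((c :: cs).length : Int) := by simp; omega
      have h3 : 0 ≤ (cs.length : Int) - 1 - i := by omega
      have h4 : (cs.length : Int) - 1 - i < (cs.length : Int) := by omega
      rw [PySem.List.pyGetD_eq_getElem (c :: cs) 0 h1 h2,
          PySem.List.pyGetD_eq_getElem cs 0 h3 (by exact_mod_cast h4)]
      have ht : ((cs.length : Int) + 1 - 1 - i).toNat = ((cs.length : Int) - 1 - i).toNat + 1 := by omega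
      simp only [ht, List.getElem_cons_succ]
    have ihu := ih
    unfold decodage decodage_alt at ihu
    rw [hcong, ihu]
    -- last term: index (n+1)-1-n = 0 picks c
    have hlast : PySem.List.pyGetD (c :: cs) ((cs.length : Int) + 1 - 1 - (cs.length : Int)) 0 = c := by
      have : (cs.length : Int) + 1 - 1 - (cs.length : Int) = 0 := by omega
      rw [this, PySem.List.pyGetD_zero_cons]
    have htoNat : ((cs.length : Int)).toNat = cs.length := by omega
    simp only [List.foldl_cons, List.foldl_nil]
    rw [hlast, htoNat, horner_shift b cs (0 * b + c)]
    ring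

-- ===== VERDICT (by name: the statement is the Claim_ definition above) =====
theorem decodage_spec : Claim_equal_decodage := by
  intro code b _ _
  unfold Spec_decodage
  exact key b code
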